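-- pv_equiv track=rewrite | github.com/Priyankaa-Das/Python_Programs | DSA/Miscellaneous/WeakestRowsFinder.py | count_soldiers
-- ===== SOURCE A (Python) =====
-- def count_soldiers(row):
--     left, right = 0, len(row)
--     while left < right:
--         mid = (left + right) // 2
--         if row[mid] == 1:
--             left = mid + 1
--         else:
--             right = mid
--     return left
-- ===== SOURCE B (Python) =====
-- def count_soldiers(row):
--     def go(left, right):
--         if left >= right:
--             return left
--         mid = (left + right) // 2
--         if row[mid] == 1:
--             return go(mid + 1, right)
--         return go(left, mid)
--     return go(0, len(row))
-- ===== Notes on version B (the rewrite author's own statement) =====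
-- stated objective: alternative
-- what changed: The iterative while-loop binary search with two mutable bounds is rewritten as a recursive divide-and-conquer helper on (left, right) with the same midpoint formula, so it matches A on every input including non-sorted rows.
import Mathlib
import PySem

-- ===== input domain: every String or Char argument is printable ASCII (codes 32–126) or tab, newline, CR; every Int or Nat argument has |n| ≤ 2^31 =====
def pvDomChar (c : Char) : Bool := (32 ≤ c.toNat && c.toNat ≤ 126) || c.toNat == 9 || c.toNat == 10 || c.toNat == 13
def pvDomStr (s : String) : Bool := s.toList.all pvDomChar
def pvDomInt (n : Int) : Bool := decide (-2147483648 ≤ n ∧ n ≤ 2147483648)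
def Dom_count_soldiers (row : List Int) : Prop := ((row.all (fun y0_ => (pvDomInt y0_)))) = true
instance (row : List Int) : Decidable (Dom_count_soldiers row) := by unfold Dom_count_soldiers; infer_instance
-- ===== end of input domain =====

-- B: the same binary search, decomposed as a recursive divide-and-conquer helper instead of A's while loop with mutable bounds.
-- ===== PORT A =====
-- A's while loop over mutable state (left, right); terminates because right - left shrinks.
def countLoopA (row : List Int) (left right : Int) : Int :=
  if hlr : left < right then
    let mid := PySem.Int.floordiv (left + right) 2
    -- row[mid]: mid is always in range on the loop's reachable states, so pyGet? returns some
    if (PySem.List.pyGet? row mid).getD 0 = 1 then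
      countLoopA row (mid + 1) right
    else
      countLoopA row left mid
  else left
termination_by (right - left).toNat
decreasing_by
  · have h := PySem.Int.floordiv_two_mid_bounds (le_of_lt hlr)
    omega
  · have _h := PySem.Int.floordiv_two_mid_bounds (le_of_lt hlr)
    have h2 : PySem.Int.floordiv (left + right) 2 < right := by
      rw [PySem.Int.floordiv_lt_iff_lt_mul (by omega : (0:Int) < 2)]
      omega
    omega

def count_soldiers (row : List Int) : Int :=
  countLoopA row 0 (row.length : Int)

-- ===== PORT B =====
-- B's recursive helper go(left, right); bounds are Nat since the recursion starts at (0, len(row)).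
def goB (row : List Int) (left right : Nat) : Nat :=
  if left ≥ right then left
  else
    let mid := (left + right) / 2
    -- row[mid]: mid < row.length on every reachable call, so getD never uses the default
    if row.getD mid 0 = 1 then goB row (mid + 1) right
    else goB row left mid
termination_by right - left
decreasing_by all_goals omega

def count_soldiers_alt (row : List Int) : Int :=
  (goB row 0 row.length : Int)

-- ===== PRECONDITION & SPEC =====
def Spec_count_soldiers (row : List Int) (out : Int) : Prop := out = count_soldiers_alt row
instance (row : List Int) (out : Int) : Decidable (Spec_count_soldiers row out) := by unfold Spec_count_soldiers; infer_instance

-- ===== CLAIM (what is proved, stated in full; the proofs are below) =====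
def Claim_equal_count_soldiers : Prop := ∀ (row : List Int), Dom_count_soldiers row → Spec_count_soldiers row (count_soldiers row)

-- ===== LEMMAS AND PROOFS =====
-- The iterative loop on Int bounds computes the recursive helper on the corresponding Nat bounds.
theorem countLoopA_eq_goB (row : List Int) (l r : Nat) :
    countLoopA row (l : Int) (r : Int) = ((goB row l r : Nat) : Int) := by
  by_cases h : l < r
  · have hmid : PySem.Int.floordiv ((l : Int) + (r : Int)) 2 = (((l + r) / 2 : Nat) : Int) := by
      exact_mod_cast PySem.Int.floordiv_natCast (l + r) 2
    have hget : (PySem.List.pyGet? row ((((l + r) / 2 : Nat)) : Int)).getD 0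
        = row.getD ((l + r) / 2) 0 := by
      rw [PySem.List.pyGet?_natCast]; simp [List.getD]
    rw [countLoopA, goB]
    have hl : (l : Int) < (r : Int) := by exact_mod_cast h
    rw [dif_pos hl, if_neg (by omega : ¬ l ≥ r)]
    simp only [hmid, hget]
    by_cases hv : row.getD ((l + r) / 2) 0 = 1
    · rw [if_pos hv, if_pos hv]
      have hc : (((l + r) / 2 : Nat) : Int) + 1 = (((l + r) / 2 + 1 : Nat) : Int) := by push_cast; ring
      rw [hc]
      exact countLoopA_eq_goB row ((l + r) / 2 + 1) r
    · rw [if_neg hv, if_neg hv]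
      exact countLoopA_eq_goB row l ((l + r) / 2)
  · rw [countLoopA, goB]
    rw [dif_neg (by exact_mod_cast h), if_pos (by omega : l ≥ r)]
termination_by r - l
decreasing_by all_goals omega

-- ===== VERDICT (by name: the statement is the Claim_ definition above) =====
theorem count_soldiers_spec : Claim_equal_count_soldiers := by
  intro row _
  unfold Spec_count_soldiers count_soldiers count_soldiers_alt
  exact countLoopA_eq_goB row 0 row.length
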